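-- pv_equiv track=rewrite | github.com/hanulkimm/- | 프로그래머스/lv4/42891. 무지의 먹방 라이브/무지의 먹방 라이브.py | solution
-- ===== SOURCE A (Python) =====
-- from heapq import heappush, heappop
--
-- def solution(food_times, k):
--     answer = 0
--     if sum(food_times)<=k:
--         return -1
--
--     hq = []
--     length = len(food_times)
--     for i in range(length):
--         heappush(hq, (food_times[i],i+1))
--     time = 0
--     while (hq[0][0]-time)*length<=k:
--         k -= (hq[0][0]-time)*length
--         time += (hq[0][0]-time)
--         length -= 1
--         heappop(hq)
--     result = sorted(hq, key = lambda x:x[1])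
--     answer = result[k%length][1]
--     return answer
-- ===== SOURCE B (Python) =====
-- def solution(food_times, k):
--     if sum(food_times) <= k:
--         return -1
--     n = len(food_times)
--
--     def cost(T):
--         # total seconds consumed if every dish is eaten up to at most T seconds
--         return sum(min(t, T) for t in food_times)
--
--     # binary search for the largest threshold T with cost(T) <= k
--     lo = min(min(food_times), k // n)
--     hi = max(food_times)
--     while lo < hi:
--         mid = (lo + hi + 1) // 2
--         if cost(mid) <= k:
--             lo = mid
--         else:
--             hi = mid - 1
--     survivors = [i + 1 for i, t in enumerate(food_times) if t > lo]
--     return survivors[k - cost(lo)]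
-- ===== Notes on version B (the rewrite author's own statement) =====
-- stated objective: alternative
-- what changed: Replaces A's heap simulation (heappush build + a heappop loop that eats whole rounds dish by dish) with a binary search for the largest per-dish time threshold T with sum(min(t, T)) <= k, then indexes the index-ordered survivors t > T directly -- no heap and no sort at all.
import Mathlib
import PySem

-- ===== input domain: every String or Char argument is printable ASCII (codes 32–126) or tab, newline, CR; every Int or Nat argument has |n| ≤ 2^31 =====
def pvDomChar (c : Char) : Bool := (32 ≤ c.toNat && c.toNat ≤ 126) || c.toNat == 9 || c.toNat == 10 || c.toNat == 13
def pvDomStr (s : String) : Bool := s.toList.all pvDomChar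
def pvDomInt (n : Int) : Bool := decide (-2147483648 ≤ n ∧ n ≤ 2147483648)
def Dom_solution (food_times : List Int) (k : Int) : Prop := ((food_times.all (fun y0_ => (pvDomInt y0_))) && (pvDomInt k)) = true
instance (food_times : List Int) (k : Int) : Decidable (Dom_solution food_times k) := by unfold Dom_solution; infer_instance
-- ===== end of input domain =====

-- B abandons A's heap simulation entirely: it binary-searches the largest per-dish time
-- threshold T whose total consumption Σ min(t, T) fits in k, then reads the answer off the
-- index-ordered survivors t > T; objective: alternative algorithm (no heap, no sort).

-- ===== PORT A =====
-- Python compares the heap's (time, index) tuples lexicographically.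
def pvLexLt (a b : Int × Int) : Bool := a.1 < b.1 || (a.1 == b.1 && a.2 < b.2)

-- heapq is used purely as a priority-queue ADT; ported as the canonical sorted-list
-- priority queue: heappush = ordered insert under Python's tuple order, heappop = drop
-- the head (the minimum) — exact for the values A computes.
def pvHeapPush (hq : List (Int × Int)) (x : Int × Int) : List (Int × Int) :=
  PySem.List.insertBy pvLexLt x hq

-- A's while loop: state (hq, k, time, length); heappop = take the tail.
def pvPopLoop : List (Int × Int) → Int → Int → Int → List (Int × Int) × Int × Int
  | [], k, _t, length => ([], k, length)
  | (t, i) :: rest, k, time, length =>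
    if (t - time) * length ≤ k then
      pvPopLoop rest (k - (t - time) * length) t (length - 1)
    else ((t, i) :: rest, k, length)

def solution (food_times : List Int) (k : Int) : Int :=
  if food_times.sum ≤ k then -1
  else
    -- for i in range(length): heappush(hq, (food_times[i], i+1))
    let hq := (PySem.List.enumerate food_times 1).foldl (fun h p => pvHeapPush h (p.2, p.1)) []
    let r := pvPopLoop hq k 0 (food_times.length : Int)
    let result := PySem.List.sorted r.1 (fun x => x.2) false
    ((PySem.List.pyGet? result (PySem.Int.mod r.2.1 r.2.2)).getD (0, 0)).2

-- ===== PORT B =====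
-- cost(T) = sum(min(t, T) for t in food_times)
def pvCost (ts : List Int) (T : Int) : Int := (ts.map (fun t => min t T)).sum

-- while lo < hi: mid = (lo+hi+1)//2; if cost(mid) <= k: lo = mid else hi = mid - 1
def pvBSearch (ts : List Int) (k lo hi : Int) : Int :=
  if lo < hi then
    if pvCost ts (PySem.Int.floordiv (lo + hi + 1) 2) ≤ k then
      pvBSearch ts k (PySem.Int.floordiv (lo + hi + 1) 2) hi
    else pvBSearch ts k lo (PySem.Int.floordiv (lo + hi + 1) 2 - 1)
  else lo
termination_by (hi - lo).toNat
decreasing_by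
  all_goals
    (have hb := PySem.Int.floordiv_two_mid_bounds (lo := lo + 1) (hi := hi) (by omega)
     rw [show lo + 1 + hi = lo + hi + 1 by ring] at hb
     omega)

def solution_alt (food_times : List Int) (k : Int) : Int :=
  if food_times.sum ≤ k then -1
  else
    let n : Int := (food_times.length : Int)
    let lo := min ((PySem.List.min? food_times (fun x => x)).getD 0) (PySem.Int.floordiv k n)
    let hi := (PySem.List.max? food_times (fun x => x)).getD 0
    let T := pvBSearch food_times k lo hi
    let survivors := ((PySem.List.enumerate food_times 1).filter (fun p => decide (T < p.2))).map (fun p => p.1)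
    (PySem.List.pyGet? survivors (k - pvCost food_times T)).getD 0

-- ===== PRECONDITION & SPEC =====
-- Pre_ excludes only (food_times = [], k < 0): there the guard does not fire and
-- Python A raises IndexError on hq[0] (B raises ValueError on min([])).
def Pre_solution (food_times : List Int) (k : Int) : Prop := food_times = [] → 0 ≤ k
instance (food_times : List Int) (k : Int) : Decidable (Pre_solution food_times k) := by
  unfold Pre_solution; infer_instance
def pvWitness_solution : List Int × Int := ([3, 1, 2], 5)
def Spec_solution (food_times : List Int) (k : Int) (out : Int) : Prop := out = solution_alt food_times k
instance (food_times : List Int) (k : Int) (out : Int) : Decidable (Spec_solution food_times k out) := by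
  unfold Spec_solution; infer_instance

-- ===== CLAIM (what is proved, stated in full; the proofs are below) =====
def Claim_equal_solution : Prop := ∀ (food_times : List Int) (k : Int), Dom_solution food_times k → Pre_solution food_times k → Spec_solution food_times k (solution food_times k)

-- ===== LEMMAS AND PROOFS =====

-- ---- A-side: the heap build is the sorted pair list, the pop loop is an index scan ----

-- Inserting x behind strictly smaller indices: Python's tuple order and the
-- first-component order agree, because the index tie-break can never fire.
theorem pv_insert_eq (x : Int × Int) (acc : List (Int × Int))
    (h : ∀ y ∈ acc, y.2 < x.2) :
    PySem.List.insertBy (fun a b : Int × Int => decide (a.1 < b.1)) x acc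
      = PySem.List.insertBy pvLexLt x acc := by
  induction acc with
  | nil => rfl
  | cons y ys ih =>
    have hy : y.2 < x.2 := h y (List.mem_cons_self)
    have hlex : pvLexLt x y = decide (x.1 < y.1) := by
      simp only [pvLexLt]
      by_cases hxy : x.1 < y.1 <;> by_cases heq : x.1 = y.1 <;> simp [hxy, heq] <;> omega
    simp only [PySem.List.insertBy, hlex]
    by_cases hc : x.1 < y.1
    · simp [hc]
    · simp only [hc, decide_false, Bool.false_eq_true, if_false, List.cons.injEq, true_and]
      exact ih (fun z hz => h z (List.mem_cons_of_mem _ hz))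

-- The whole build: A's heappush fold equals the insertion fold that PySem.List.sorted
-- (key = first component) is, provided the second components strictly increase.
theorem pv_fold_eq (P : List (Int × Int)) (hP : P.Pairwise (fun a b => a.2 < b.2)) :
    ∀ acc : List (Int × Int), (∀ y ∈ acc, ∀ x ∈ P, y.2 < x.2) →
    P.foldl (fun h p => pvHeapPush h p) acc
      = P.foldl (fun acc x => PySem.List.insertBy (fun a b : Int × Int => decide (a.1 < b.1)) x acc) acc := by
  induction P with
  | nil => intro acc _; rfl
  | cons x xs ih =>
    intro acc hacc
    have h1 : ∀ y ∈ acc, y.2 < x.2 := fun y hy => hacc y hy x (List.mem_cons_self)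
    simp only [List.foldl_cons]
    rw [pv_insert_eq x acc h1]
    apply ih (List.Pairwise.of_cons hP)
    intro y hy z hz
    rcases (PySem.List.mem_insertBy pvLexLt x y acc).mp hy with h | h
    · subst h; exact (List.pairwise_cons.mp hP).1 z hz
    · exact hacc y h z (List.mem_cons_of_mem _ hz)

-- A's heap, after all pushes, IS the pair list sorted by time.
theorem pv_build_eq (food_times : List Int) :
    (PySem.List.enumerate food_times 1).foldl (fun h p => pvHeapPush h (p.2, p.1)) []
      = PySem.List.sorted ((PySem.List.enumerate food_times 1).map (fun p => (p.2, p.1))) (fun p => p.1) false := by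
  have h1 : (PySem.List.enumerate food_times 1).foldl (fun h p => pvHeapPush h (p.2, p.1)) []
      = ((PySem.List.enumerate food_times 1).map (fun p => (p.2, p.1))).foldl (fun h p => pvHeapPush h p) [] := by
    rw [List.foldl_map]
  have hpw : ((PySem.List.enumerate food_times 1).map (fun p => (p.2, p.1))).Pairwise
      (fun a b : Int × Int => a.2 < b.2) := by
    have := PySem.List.pairwise_lt_enumerate food_times 1
    exact (List.pairwise_map).mpr (by exact this.imp (fun h => by simpa using h))
  rw [h1, PySem.List.sorted_eq_foldl_insertBy]
  exact pv_fold_eq _ hpw [] (by simp)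

-- A's pop loop rephrased as a cursor over the sorted list (proof helper only).
def pvScan (pairs : List (Int × Int)) (i : Nat) (k prev : Int) : Nat × Int :=
  if h : i < pairs.length then
    if (pairs[i].1 - prev) * ((pairs.length : Int) - (i : Int)) ≤ k then
      pvScan pairs (i + 1) (k - (pairs[i].1 - prev) * ((pairs.length : Int) - (i : Int))) pairs[i].1
    else (i, k)
  else (i, k)
termination_by pairs.length - i

-- The popping loop on the sorted list is the cursor scan.
theorem pv_loop_eq (S : List (Int × Int)) :
    ∀ fuel i k prev, S.length - i ≤ fuel → i ≤ S.length →
    pvPopLoop (S.drop i) k prev ((S.length : Int) - (i : Int))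
      = (S.drop (pvScan S i k prev).1, (pvScan S i k prev).2,
         ((S.length : Int) - ((pvScan S i k prev).1 : Int)))
      ∧ (pvScan S i k prev).1 ≤ S.length := by
  intro fuel
  induction fuel with
  | zero =>
    intro i k prev hfuel hi
    have hieq : i = S.length := by omega
    subst hieq
    rw [pvScan]
    simp [List.drop_length, pvPopLoop]
  | succ fuel ih =>
    intro i k prev hfuel hi
    by_cases h : i < S.length
    · have hdrop : S.drop i = S[i] :: S.drop (i + 1) := List.drop_eq_getElem_cons h
      rw [pvScan]
      simp only [h, dif_pos]
      rcases hx : S[i] with ⟨t, j⟩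
      by_cases hc : (t - prev) * ((S.length : Int) - (i : Int)) ≤ k
      · have hrec := ih (i + 1) (k - (t - prev) * ((S.length : Int) - (i : Int))) t
          (by omega) (by omega)
        have hcast : (S.length : Int) - (i : Int) - 1 = (S.length : Int) - ((i + 1 : Nat) : Int) := by
          push_cast; ring
        rw [hdrop, hx]
        simp only [pvPopLoop, hc, if_pos]
        rw [hcast]
        simpa [hx, hc] using hrec
      · rw [hdrop, hx]
        simp only [pvPopLoop, hc, if_neg]
        refine ⟨?_, by simp; omega⟩
        simp [hdrop, hx]
    · have hieq : i = S.length := by omega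
      subst hieq
      rw [pvScan]
      simp [List.drop_length, pvPopLoop]

theorem pv_len_enum (xs : List Int) : (PySem.List.enumerate xs 1).length = xs.length :=
  PySem.List.length_enumerate xs 1

-- ---- shared bookkeeping ----

def pvSumTake (S : List (Int × Int)) (i : Nat) : Int := ((S.take i).map Prod.fst).sum

theorem pv_sumTake_succ (S : List (Int × Int)) (i : Nat) (h : i < S.length) :
    pvSumTake S (i + 1) = pvSumTake S i + S[i].1 := by
  simp only [pvSumTake, List.take_add_one, List.getElem?_eq_getElem h, Option.toList_some,
    List.map_append, List.sum_append, List.map_cons, List.map_nil, List.sum_cons, List.sum_nil]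
  ring

-- Scan characterisation: at the stop point (i', k') with last popped time prev',
-- the popped prefix is ≤ prev', the next dish (if any) is too expensive, the
-- consumed seconds balance, and k' stayed nonnegative unless nothing was popped.
theorem pv_scan_char (S : List (Int × Int)) (hs : S.Pairwise (fun a b => a.1 ≤ b.1)) :
    ∀ fuel i k prev, S.length - i ≤ fuel → i ≤ S.length →
    (∀ j (hj : j < S.length), j < i → S[j].1 ≤ prev) →
    ∃ prev',
      i ≤ (pvScan S i k prev).1 ∧ (pvScan S i k prev).1 ≤ S.length ∧
      (∀ j (hj : j < S.length), j < (pvScan S i k prev).1 → S[j].1 ≤ prev') ∧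
      (∀ h : (pvScan S i k prev).1 < S.length,
        (pvScan S i k prev).2
          < (S[(pvScan S i k prev).1].1 - prev') * ((S.length : Int) - ((pvScan S i k prev).1 : Int))) ∧
      pvSumTake S (pvScan S i k prev).1 + prev' * ((S.length : Int) - ((pvScan S i k prev).1 : Int))
        = pvSumTake S i + prev * ((S.length : Int) - (i : Int)) + (k - (pvScan S i k prev).2) ∧
      ((pvScan S i k prev).1 = i ∧ prev' = prev ∧ (pvScan S i k prev).2 = k ∨ 0 ≤ (pvScan S i k prev).2) := by
  have hget := (List.pairwise_iff_getElem).mp hs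
  intro fuel
  induction fuel with
  | zero =>
    intro i k prev hfuel hi hprev
    have hieq : i = S.length := by omega
    subst hieq
    refine ⟨prev, ?_⟩
    rw [pvScan]
    simp only [lt_irrefl, dite_false]
    exact ⟨le_refl _, le_refl _, hprev, fun h => h.elim, by ring, Or.inl ⟨trivial, trivial, trivial⟩⟩
  | succ fuel ih =>
    intro i k prev hfuel hi hprev
    by_cases h : i < S.length
    · rw [pvScan]
      simp only [h, dite_true]
      by_cases hc : (S[i].1 - prev) * ((S.length : Int) - (i : Int)) ≤ k
      · simp only [hc, if_true]
        have hprev2 : ∀ j (hj : j < S.length), j < i + 1 → S[j].1 ≤ S[i].1 := by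
          intro j hj hji
          rcases Nat.lt_or_ge j i with hji' | hji'
          · exact hget j i hj h hji'
          · have : j = i := by omega
            subst this; exact le_refl _
        obtain ⟨prev', h1, h2, h3, h4, h5, h6⟩ :=
          ih (i + 1) (k - (S[i].1 - prev) * ((S.length : Int) - (i : Int))) S[i].1
            (by omega) (by omega) hprev2
        refine ⟨prev', by omega, h2, h3, h4, ?_, ?_⟩
        · rw [h5, pv_sumTake_succ S i h]
          push_cast
          ring
        · rcases h6 with ⟨_, _, hk⟩ | hk
          · right; rw [hk]; omega
          · right; exact hk
      · simp only [hc, if_false]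
        exact ⟨prev, le_refl _, hi, hprev, fun _ => by omega, by ring,
          Or.inl ⟨trivial, rfl, trivial⟩⟩
    · have hieq : i = S.length := by omega
      subst hieq
      refine ⟨prev, ?_⟩
      rw [pvScan]
      simp only [lt_irrefl, dite_false]
      exact ⟨le_refl _, le_refl _, hprev, fun h => h.elim, by ring, Or.inl ⟨trivial, trivial, trivial⟩⟩

-- ---- the cost function Σ min(t, T) ----

theorem pv_cost_perm {l l' : List Int} (h : l.Perm l') (T : Int) : pvCost l T = pvCost l' T :=
  List.Perm.sum_eq (h.map _)

theorem pv_cost_mono (l : List Int) {T T' : Int} (h : T ≤ T') : pvCost l T ≤ pvCost l T' := by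
  induction l with
  | nil => simp [pvCost]
  | cons x xs ih =>
    simp only [pvCost, List.map_cons, List.sum_cons] at *
    have : min x T ≤ min x T' := by omega
    omega

theorem pv_cost_all_le (l : List Int) (T : Int) (h : ∀ x ∈ l, x ≤ T) : pvCost l T = l.sum := by
  induction l with
  | nil => rfl
  | cons x xs ih =>
    simp only [pvCost, List.map_cons, List.sum_cons] at *
    have hx : x ≤ T := h x (List.mem_cons_self)
    rw [min_eq_left hx, ih (fun y hy => h y (List.mem_cons_of_mem _ hy))]

theorem pv_cost_all_ge (l : List Int) (T : Int) (h : ∀ x ∈ l, T ≤ x) :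
    pvCost l T = (l.length : Int) * T := by
  induction l with
  | nil => simp [pvCost]
  | cons x xs ih =>
    simp only [pvCost, List.map_cons, List.sum_cons, List.length_cons] at *
    rw [min_eq_right (h x (List.mem_cons_self)), ih (fun y hy => h y (List.mem_cons_of_mem _ hy))]
    push_cast; ring

-- cost of the pair-times split at the stop point.
theorem pv_cost_split (S : List (Int × Int)) (T : Int) :
    ∀ i, i ≤ S.length →
    (∀ j (hj : j < S.length), j < i → S[j].1 ≤ T) →
    (∀ j (hj : j < S.length), i ≤ j → T ≤ S[j].1) →
    pvCost (S.map Prod.fst) T = pvSumTake S i + T * ((S.length : Int) - (i : Int)) := by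
  induction S with
  | nil =>
    intro i hi _ _
    have : i = 0 := by simpa using hi
    subst this
    simp [pvCost, pvSumTake]
  | cons p rest ih =>
    intro i hi hlo hhi
    cases i with
    | zero =>
      have hall : ∀ x ∈ (p :: rest).map Prod.fst, T ≤ x := by
        intro x hx
        rw [List.mem_map] at hx
        obtain ⟨q, hq, rfl⟩ := hx
        obtain ⟨j, hj, rfl⟩ := List.mem_iff_getElem.mp hq
        exact hhi j hj (Nat.zero_le _)
      rw [pv_cost_all_ge _ _ hall]
      simp [pvSumTake]
      push_cast; ring
    | succ i' =>
      have hstep : pvCost ((p :: rest).map Prod.fst) T = p.1 + pvCost (rest.map Prod.fst) T := by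
        have hp : min p.1 T = p.1 := min_eq_left (by
          have := hlo 0 (by simp) (Nat.succ_pos _)
          simpa using this)
        simp [pvCost, hp]
      rw [hstep, ih i' (by simpa using hi)
        (fun j hj hji => by
          have := hlo (j + 1) (by simpa using Nat.succ_lt_succ hj) (Nat.succ_lt_succ hji)
          simpa using this)
        (fun j hj hji => by
          have := hhi (j + 1) (by simpa using Nat.succ_lt_succ hj) (Nat.succ_le_succ hji)
          simpa using this)]
      have hTake : pvSumTake (p :: rest) (i' + 1) = p.1 + pvSumTake rest i' := by
        simp [pvSumTake]
      rw [hTake]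
      simp only [List.length_cons]
      push_cast
      ring

-- ---- binary search ----

theorem pv_bsearch_spec (ts : List Int) (k : Int) :
    ∀ fuel lo hi, (hi - lo).toNat ≤ fuel → lo ≤ hi →
    pvCost ts lo ≤ k → k < pvCost ts (hi + 1) →
    pvCost ts (pvBSearch ts k lo hi) ≤ k ∧ k < pvCost ts (pvBSearch ts k lo hi + 1) := by
  intro fuel
  induction fuel with
  | zero =>
    intro lo hi hfuel hle h1 h2
    have : lo = hi := by omega
    subst this
    rw [pvBSearch]
    simp only [lt_irrefl, if_false]
    exact ⟨h1, h2⟩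
  | succ fuel ih =>
    intro lo hi hfuel hle h1 h2
    rw [pvBSearch]
    by_cases hlt : lo < hi
    · simp only [hlt, if_true]
      have hb := PySem.Int.floordiv_two_mid_bounds (lo := lo + 1) (hi := hi) (by omega)
      rw [show lo + 1 + hi = lo + hi + 1 by ring] at hb
      by_cases hc : pvCost ts (PySem.Int.floordiv (lo + hi + 1) 2) ≤ k
      · simp only [hc, if_true]
        exact ih _ hi (by omega) (by omega) hc h2
      · simp only [hc, if_false]
        have : k < pvCost ts (PySem.Int.floordiv (lo + hi + 1) 2 - 1 + 1) := by
          rw [show PySem.Int.floordiv (lo + hi + 1) 2 - 1 + 1 = PySem.Int.floordiv (lo + hi + 1) 2 by ring]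
          omega
        exact ih lo _ (by omega) (by omega) h1 this
    · simp only [hlt, if_false]
      have : lo = hi := by omega
      subst this
      exact ⟨h1, h2⟩

theorem pv_T_unique (ts : List Int) (k a b : Int)
    (ha1 : pvCost ts a ≤ k) (ha2 : k < pvCost ts (a + 1))
    (hb1 : pvCost ts b ≤ k) (hb2 : k < pvCost ts (b + 1)) : a = b := by
  rcases lt_trichotomy a b with h | h | h
  · have : pvCost ts (a + 1) ≤ pvCost ts b := pv_cost_mono ts (by omega)
    omega
  · exact h
  · have : pvCost ts (b + 1) ≤ pvCost ts a := pv_cost_mono ts (by omega)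
    omega

-- ---- survivors ----

theorem pv_filter_eq_drop (S : List (Int × Int)) (T : Int) (i : Nat) (hi : i ≤ S.length)
    (hlo : ∀ j (hj : j < S.length), j < i → S[j].1 ≤ T)
    (hhi : ∀ j (hj : j < S.length), i ≤ j → T < S[j].1) :
    S.filter (fun p => decide (T < p.1)) = S.drop i := by
  conv_lhs => rw [← List.take_append_drop i S]
  rw [List.filter_append]
  have htake : (S.take i).filter (fun p => decide (T < p.1)) = [] := by
    rw [List.filter_eq_nil_iff]
    intro p hp
    obtain ⟨j, hj, rfl⟩ := List.mem_iff_getElem.mp hp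
    have hjlen : j < S.length := by
      have := hj; simp [List.length_take] at this; omega
    have hji : j < i := by
      have := hj; simp [List.length_take] at this; omega
    rw [List.getElem_take]
    simpa using not_lt.mpr (hlo j hjlen hji)
  have hdrop : (S.drop i).filter (fun p => decide (T < p.1)) = S.drop i := by
    rw [List.filter_eq_self]
    intro p hp
    obtain ⟨j, hj, rfl⟩ := List.mem_iff_getElem.mp hp
    rw [List.getElem_drop]
    have hjlen : i + j < S.length := by
      have := hj; simp [List.length_drop] at this; omega
    simpa using hhi (i + j) hjlen (by omega)
  rw [htake, hdrop, List.nil_append]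

-- ===== VERDICT (by name: the statement is the Claim_ definition above) =====
theorem solution_spec : Claim_equal_solution := by
  unfold Claim_equal_solution Spec_solution
  intro food_times k _ hpre
  unfold solution solution_alt
  by_cases hg : food_times.sum ≤ k
  · simp [hg]
  · simp only [hg, if_false]
    -- shared set-up
    set pairsIdx := PySem.List.enumerate food_times 1 with hPI
    set P := pairsIdx.map (fun p => (p.2, p.1)) with hP
    set S := PySem.List.sorted P (fun p => p.1) false with hS
    have hlen : S.length = food_times.length := by
      rw [hS, (PySem.List.sorted_perm P (fun p => p.1) false).length_eq, hP,
        List.length_map, hPI, pv_len_enum]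
    have hsortS : S.Pairwise (fun a b : Int × Int => a.1 ≤ b.1) := by
      simpa using PySem.List.sorted_pairwise P (fun p => p.1)
    have hPfst : P.map Prod.fst = food_times := by
      rw [hP, List.map_map]
      exact PySem.List.map_snd_enumerate food_times 1
    have hpermf : (S.map Prod.fst).Perm (P.map Prod.fst) :=
      (PySem.List.sorted_perm P (fun p => p.1) false).map _
    have hfstsum : (S.map Prod.fst).sum = food_times.sum := by
      rw [hpermf.sum_eq, hPfst]
    have hcostS : ∀ T : Int, pvCost food_times T = pvCost (S.map Prod.fst) T := by
      intro T
      refine pv_cost_perm ?_ T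
      rw [← hPfst]
      exact hpermf.symm
    -- A's loop
    have hbuild := pv_build_eq food_times
    have hloop := (pv_loop_eq S S.length 0 k 0 (by omega) (by omega)).1
    simp only [List.drop_zero, Nat.cast_zero, sub_zero] at hloop
    set i' := (pvScan S 0 k 0).1 with hi'
    set k' := (pvScan S 0 k 0).2 with hk'
    set m : Int := (S.length : Int) - (i' : Int) with hm
    -- scan characterisation
    obtain ⟨prev', hc1, hc2, hc3, hc4, hc5, hc6⟩ :=
      pv_scan_char S hsortS S.length 0 k 0 (by omega) (by omega)
        (fun j hj hji => absurd hji (Nat.not_lt_zero j))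
    have hsum0 : pvSumTake S 0 = 0 := by simp [pvSumTake]
    rw [hsum0] at hc5
    have hbal : pvSumTake S i' + prev' * m = k - k' := by rw [hm]; linarith [hc5]
    have hne : food_times ≠ [] := by
      intro hnil
      rw [hnil] at hg
      simp at hg
      exact absurd (hpre hnil) (by omega)
    have hn0 : 0 < food_times.length := List.length_pos_iff.mpr hne
    have hi'lt : i' < S.length := by
      by_contra hcon
      have hieq : i' = S.length := by omega
      have hsumT : pvSumTake S S.length = (S.map Prod.fst).sum := by
        simp [pvSumTake]
      rw [hieq, hsumT, hfstsum] at hbal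
      have hmz : m = 0 := by rw [hm, hieq]; ring
      rcases hc6 with ⟨h0, _, _⟩ | hk0
      · omega
      · rw [hmz] at hbal
        omega
    have hmpos : 0 < m := by rw [hm]; omega
    set d := PySem.Int.floordiv k' m with hd
    set T := prev' + d with hT
    have hstop := hc4 hi'lt
    have hdlt : d < (S[i']'hi'lt).1 - prev' := by
      rw [hd]
      exact (PySem.Int.floordiv_lt_iff_lt_mul hmpos).mpr (by rw [hm]; linarith [hstop])
    have hloT : ∀ j (hj : j < S.length), j < i' → S[j].1 ≤ T := by
      intro j hj hji
      rcases hc6 with ⟨h0, _, _⟩ | hk0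
      · omega
      · have hd0 : 0 ≤ d := by
          rw [hd]
          exact (PySem.Int.le_floordiv_iff_mul_le hmpos).mpr (by linarith)
        have := hc3 j hj hji
        rw [hT]
        omega
    have hhiT : ∀ j (hj : j < S.length), i' ≤ j → T < S[j].1 := by
      intro j hj hji
      have hij : (S[i']'hi'lt).1 ≤ S[j].1 := by
        rcases Nat.eq_or_lt_of_le hji with heq | hlt
        · simp [← heq]
        · exact (List.pairwise_iff_getElem.mp hsortS) i' j hi'lt hj hlt
      rw [hT]
      omega
    have hcostT : pvCost food_times T = k - k' + d * m := by
      rw [hcostS T, pv_cost_split S T i' (le_of_lt hi'lt) hloT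
        (fun j hj hji => le_of_lt (hhiT j hj hji))]
      rw [← hm]
      linear_combination hbal
    have hcostT1 : pvCost food_times (T + 1) = k - k' + d * m + m := by
      rw [hcostS, pv_cost_split S (T + 1) i' (le_of_lt hi'lt)
        (fun j hj hji => by have := hloT j hj hji; omega)
        (fun j hj hji => by have := hhiT j hj hji; omega)]
      try rw [← hm]
      linear_combination hbal
    have hmodp := PySem.Int.floordiv_mul_add_mod k' m
    have hmod0 := PySem.Int.mod_nonneg k' hmpos
    have hmodlt := PySem.Int.mod_lt k' hmpos
    rw [← hd] at hmodp
    have hT1 : pvCost food_times T ≤ k := by rw [hcostT]; linarith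
    have hT2 : k < pvCost food_times (T + 1) := by rw [hcostT1]; linarith
    -- B's binary search finds the same threshold
    obtain ⟨mn, hmn⟩ : ∃ mn, PySem.List.min? food_times (fun x => x) = some mn := by
      cases hx : PySem.List.min? food_times (fun x => x) with
      | none => exact absurd ((PySem.List.min?_eq_none_iff _ _).mp hx) hne
      | some v => exact ⟨v, rfl⟩
    obtain ⟨mx, hmx⟩ : ∃ mx, PySem.List.max? food_times (fun x => x) = some mx := by
      cases hx : PySem.List.max? food_times (fun x => x) with
      | none => exact absurd ((PySem.List.max?_eq_none_iff _ _).mp hx) hne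
      | some v => exact ⟨v, rfl⟩
    have hmnle : ∀ x ∈ food_times, mn ≤ x := fun x hx => by
      simpa using PySem.List.min?_isMin hmn x hx
    have hmxge : ∀ x ∈ food_times, x ≤ mx := fun x hx => by
      simpa using PySem.List.max?_isMax hmx x hx
    set n : Int := (food_times.length : Int) with hn
    have hnpos : 0 < n := by rw [hn]; exact_mod_cast hn0
    set lo0 := min mn (PySem.Int.floordiv k n) with hlo0
    have hcostlo : pvCost food_times lo0 ≤ k := by
      rw [pv_cost_all_ge food_times lo0 (fun x hx => le_trans (min_le_left _ _) (hmnle x hx))]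
      have h1 : PySem.Int.floordiv k n * n ≤ k := by
        have := PySem.Int.floordiv_mul_add_mod k n
        have := PySem.Int.mod_nonneg k hnpos
        linarith
      have h2 : n * lo0 ≤ n * PySem.Int.floordiv k n :=
        mul_le_mul_of_nonneg_left (min_le_right _ _) (le_of_lt hnpos)
      have h3 : n * PySem.Int.floordiv k n = PySem.Int.floordiv k n * n := mul_comm _ _
      rw [← hn]
      linarith
    have hcosthi : k < pvCost food_times (mx + 1) := by
      have h1 : pvCost food_times mx = food_times.sum := pv_cost_all_le _ _ hmxge
      have h2 : pvCost food_times mx ≤ pvCost food_times (mx + 1) := pv_cost_mono _ (by omega)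
      omega
    have hlohi : lo0 ≤ mx := le_trans (min_le_left _ _) (hmxge mn (PySem.List.min?_mem hmn))
    have hbs := pv_bsearch_spec food_times k (mx - lo0).toNat lo0 mx (le_refl _) hlohi hcostlo hcosthi
    have hTeq : pvBSearch food_times k lo0 mx = T :=
      pv_T_unique food_times k _ _ hbs.1 hbs.2 hT1 hT2
    -- the survivors
    have hfd : S.filter (fun p => decide (T < p.1)) = S.drop i' :=
      pv_filter_eq_drop S T i' (le_of_lt hi'lt) hloT hhiT
    set flt := pairsIdx.filter (fun p => decide (T < p.2)) with hflt
    have hpred : ((fun p : Int × Int => decide (T < p.1)) ∘ (fun p : Int × Int => (p.2, p.1)))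
        = (fun p : Int × Int => decide (T < p.2)) := by
      funext p
      simp [Function.comp]
    have hPfilt : P.filter (fun p => decide (T < p.1)) = flt.map (fun p => (p.2, p.1)) := by
      rw [hP, List.filter_map, hpred]
    have hpermflt : (flt.map (fun p => (p.2, p.1))).Perm (S.drop i') := by
      rw [← hPfilt, ← hfd]
      exact (List.Perm.filter _ (PySem.List.sorted_perm P (fun p => p.1) false)).symm
    have hresult : PySem.List.sorted (S.drop i') (fun x : Int × Int => x.2) false
        = flt.map (fun p => (p.2, p.1)) := by
      apply PySem.List.sorted_eq_of_perm_of_pairwise_lt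
      · exact hpermflt
      · rw [List.pairwise_map]
        have hpw : flt.Pairwise (fun p q => p.1 < q.1) :=
          List.Pairwise.sublist List.filter_sublist
            (PySem.List.pairwise_lt_enumerate food_times 1)
        exact hpw.imp (fun h => h)
    -- index equality
    have hidx : k - pvCost food_times T = PySem.Int.mod k' m := by rw [hcostT]; linarith
    have hfltlen : flt.length = S.length - i' := by
      have := hpermflt.length_eq
      rw [List.length_map, List.length_drop] at this
      omega
    set r0 : Nat := (PySem.Int.mod k' m).toNat with hr0
    have hcastr : PySem.Int.mod k' m = (r0 : Int) := by rw [hr0]; omega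
    have hr0lt : r0 < flt.length := by rw [hfltlen]; rw [hm] at hmodlt; omega
    -- assemble
    rw [hbuild, ← hS]
    rw [show ((S.length : Int)) = n by rw [hlen, hn]] at hloop
    rw [hloop, hresult]
    dsimp only
    simp only [hmn, hmx, Option.getD_some]
    rw [← hlo0, hTeq, ← hflt, hidx, hcastr, PySem.List.pyGet?_natCast,
      PySem.List.pyGet?_natCast, List.getElem?_map, List.getElem?_map,
      List.getElem?_eq_getElem hr0lt]
    simp
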